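-- pv_equiv track=rewrite | github.com/goedel-gang/babylisk | q14b.py | roll_left
-- ===== SOURCE A (Python) =====
-- def roll_left(row):
--     output = [0] * len(row)
--     floor_pos = 0
--     for i, x in enumerate(row):
--         if x == 1:
--             output[floor_pos] = 1
--             floor_pos += 1
--         elif x == 2:
--             output[i] = 2
--             floor_pos = i + 1
--     return output
-- ===== SOURCE B (Python) =====
-- # Segment decomposition: split the row at walls (2), left-pack each wall-free
-- # segment (ones first, then zeros), and rejoin the segments with a 2 between them.
-- def roll_left(row):
--     segs = []
--     cur = []
--     for x in row:
--         if x == 2: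
--             segs.append(cur)
--             cur = []
--         else:
--             cur.append(x)
--     segs = segs + [cur]
--     out = []
--     first = True
--     for s in segs:
--         if not first:
--             out.append(2)
--         first = False
--         c = s.count(1)
--         out.extend([1] * c + [0] * (len(s) - c))
--     return out
-- ===== Notes on version B (the rewrite author's own statement) =====
-- stated objective: alternative
-- what changed: Replaces A's single index-tracking pass that writes into a preallocated zero array with a segment decomposition: split the row at walls (value 2), left-pack each wall-free segment as its count of ones followed by zeros, and rejoin the segments with a wall between them.
import Mathlib
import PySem

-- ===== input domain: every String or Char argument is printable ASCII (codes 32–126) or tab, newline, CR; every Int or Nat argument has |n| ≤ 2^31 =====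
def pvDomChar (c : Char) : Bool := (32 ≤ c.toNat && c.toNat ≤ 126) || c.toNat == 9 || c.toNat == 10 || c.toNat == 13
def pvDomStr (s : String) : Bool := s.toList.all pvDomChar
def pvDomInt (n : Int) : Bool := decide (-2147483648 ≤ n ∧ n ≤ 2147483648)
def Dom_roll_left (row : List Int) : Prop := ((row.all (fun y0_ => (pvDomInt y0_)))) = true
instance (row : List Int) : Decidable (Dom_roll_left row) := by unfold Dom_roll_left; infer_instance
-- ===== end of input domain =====

-- B re-implements A by segment decomposition (split at walls, left-pack each segment,
-- rejoin with walls) instead of A's single pass writing into a preallocated zero array.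

-- ===== PORT A =====
-- the `for i, x in enumerate(row)` loop, carrying the index i and floor_pos.
-- `output[floor_pos] = 1` / `output[i] = 2` are in-range list assignments
-- (floor_pos ≤ i < len(row) always holds), so List.set is exact here.
def rollLoopA : List Int → Nat → List Int → Nat → List Int
  | [], _, out, _ => out
  | x :: t, i, out, fp =>
    if x = 1 then rollLoopA t (i + 1) (out.set fp 1) (fp + 1)
    else if x = 2 then rollLoopA t (i + 1) (out.set i 2) (i + 1)
    else rollLoopA t (i + 1) out fp

def roll_left (row : List Int) : List Int :=
  rollLoopA row 0 (List.replicate row.length 0) 0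

-- ===== PORT B =====
-- the first loop: accumulate (segs, cur), a wall (2) closes the current segment
def rollSplitStep (acc : List (List Int) × List Int) (x : Int) : List (List Int) × List Int :=
  if x = 2 then (acc.1 ++ [acc.2], []) else (acc.1, acc.2 ++ [x])

-- the second loop: (out, first); append a wall unless first, then the packed segment
def rollJoinStep (acc : List Int × Bool) (s : List Int) : List Int × Bool :=
  let out1 := if acc.2 then acc.1 else acc.1 ++ [2]
  let c := s.count 1
  (out1 ++ (List.replicate c 1 ++ List.replicate (s.length - c) 0), false)

def roll_left_alt (row : List Int) : List Int :=
  let sc := row.foldl rollSplitStep ([], [])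
  let segs := sc.1 ++ [sc.2]
  (segs.foldl rollJoinStep ([], true)).1

-- ===== PRECONDITION & SPEC =====
def Spec_roll_left (row : List Int) (out : List Int) : Prop := out = roll_left_alt row
instance (row : List Int) (out : List Int) : Decidable (Spec_roll_left row out) := by unfold Spec_roll_left; infer_instance

-- ===== CLAIM (what is proved, stated in full; the proofs are below) =====
def Claim_equal_roll_left : Prop := ∀ (row : List Int), Dom_roll_left row → Spec_roll_left row (roll_left row)

-- ===== LEMMAS AND PROOFS =====

-- recursive characterisations of B's two loops, used only in the proofs
def rollSplit : List Int → List (List Int)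
  | [] => [[]]
  | x :: t =>
    if x = 2 then [] :: rollSplit t
    else
      match rollSplit t with
      | [] => [[x]]          -- unreachable: rollSplit never returns []
      | s :: ss => (x :: s) :: ss

def rollPack (seg : List Int) : List Int :=
  List.replicate (seg.count 1) 1 ++ List.replicate (seg.length - seg.count 1) 0

def rollJoin : List (List Int) → List Int
  | [] => []
  | [p] => p
  | p :: ps => p ++ 2 :: rollJoin ps

def rollJoinRest : List (List Int) → List Int
  | [] => []
  | s :: ss => 2 :: rollPack s ++ rollJoinRest ss

theorem rollSplit_ne_nil (l : List Int) : rollSplit l ≠ [] := by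
  cases l with
  | nil => simp [rollSplit]
  | cons x t =>
    simp only [rollSplit]
    split
    · simp
    · cases h : rollSplit t <;> simp

theorem splitFold : ∀ (l : List Int) (segs : List (List Int)) (cur q : List Int) (qs : List (List Int)),
    rollSplit l = q :: qs →
    (l.foldl rollSplitStep (segs, cur)).1 ++ [(l.foldl rollSplitStep (segs, cur)).2]
      = segs ++ (cur ++ q) :: qs := by
  intro l
  induction l with
  | nil =>
    intro segs cur q qs hq
    simp only [rollSplit] at hq
    obtain ⟨rfl, rfl⟩ : q = [] ∧ qs = [] := by
      constructor <;> [exact (List.cons.injEq .. ▸ hq).1.symm; exact (List.cons.injEq .. ▸ hq).2.symm]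
    simp
  | cons x t ih =>
    intro segs cur q qs hq
    by_cases hx : x = 2
    · subst hx
      simp only [rollSplit, reduceIte] at hq
      obtain ⟨q', qs', hq'⟩ : ∃ q' qs', rollSplit t = q' :: qs' := by
        cases h : rollSplit t with
        | nil => exact absurd h (rollSplit_ne_nil t)
        | cons a b => exact ⟨a, b, rfl⟩
      rw [hq'] at hq
      obtain ⟨rfl, rfl⟩ : q = [] ∧ qs = q' :: qs' := by
        refine ⟨(List.cons.injEq .. ▸ hq).1.symm, (List.cons.injEq .. ▸ hq).2.symm⟩
      simp only [List.foldl_cons, rollSplitStep, reduceIte]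
      rw [ih (segs ++ [cur]) [] _ _ hq']
      simp
    · obtain ⟨q', qs', hq'⟩ : ∃ q' qs', rollSplit t = q' :: qs' := by
        cases h : rollSplit t with
        | nil => exact absurd h (rollSplit_ne_nil t)
        | cons a b => exact ⟨a, b, rfl⟩
      simp only [rollSplit, if_neg hx, hq'] at hq
      obtain ⟨rfl, rfl⟩ : q = x :: q' ∧ qs = qs' := by
        refine ⟨(List.cons.injEq .. ▸ hq).1.symm, (List.cons.injEq .. ▸ hq).2.symm⟩
      simp only [List.foldl_cons, rollSplitStep, if_neg hx]
      rw [ih segs (cur ++ [x]) _ _ hq']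
      simp

theorem joinFold_rest : ∀ (ps : List (List Int)) (out : List Int),
    (ps.foldl rollJoinStep (out, false)).1 = out ++ rollJoinRest ps := by
  intro ps
  induction ps with
  | nil => intro out; simp only [List.foldl_nil, rollJoinRest, List.append_nil]
  | cons s ss ih =>
    intro out
    simp only [List.foldl_cons, rollJoinStep, rollJoinRest]
    rw [ih]
    simp [rollPack]

theorem rollJoin_map_eq : ∀ (q : List Int) (qs : List (List Int)),
    rollJoin ((q :: qs).map rollPack) = rollPack q ++ rollJoinRest qs := by
  intro q qs
  induction qs generalizing q with
  | nil => simp [rollJoin, rollJoinRest]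
  | cons s ss ih =>
    simp only [List.map_cons, rollJoin, rollJoinRest]
    rw [show (rollPack s :: ss.map rollPack) = (s :: ss).map rollPack from rfl, ih s]
    simp

theorem alt_eq (row : List Int) :
    roll_left_alt row = rollJoin ((rollSplit row).map rollPack) := by
  obtain ⟨q, qs, hq⟩ : ∃ q qs, rollSplit row = q :: qs := by
    cases h : rollSplit row with
    | nil => exact absurd h (rollSplit_ne_nil row)
    | cons a b => exact ⟨a, b, rfl⟩
  have hs := splitFold row [] [] q qs hq
  simp only [List.nil_append] at hs
  simp only [roll_left_alt]
  rw [hs, hq]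
  cases qs with
  | nil =>
    simp [rollJoin, rollJoinStep, rollPack]
  | cons b bs =>
    simp only [List.foldl_cons, rollJoinStep, reduceIte]
    rw [joinFold_rest, rollJoin_map_eq]
    simp [rollPack, rollJoinRest]

-- sequence of k writes of 1 at consecutive positions starting at fp
def setOnes (out : List Int) (fp : Nat) : Nat → List Int
  | 0 => out
  | k + 1 => setOnes (out.set fp 1) (fp + 1) k

theorem set_at_length {a : Int} (pre l : List Int) (v : Int) :
    (pre ++ a :: l).set pre.length v = pre ++ v :: l := by
  induction pre with
  | nil => simp
  | cons p ps ih => simp [ih]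

theorem setOnes_spec : ∀ (k m : Nat) (pre : List Int), k ≤ m →
    setOnes (pre ++ List.replicate m 0) pre.length k
      = pre ++ List.replicate k 1 ++ List.replicate (m - k) 0 := by
  intro k
  induction k with
  | zero => intro m pre _; simp [setOnes]
  | succ k ih =>
    intro m pre hk
    obtain ⟨m', rfl⟩ : ∃ m', m = m' + 1 := ⟨m - 1, by omega⟩
    have h1 : (pre ++ List.replicate (m' + 1) (0 : Int)).set pre.length 1
        = (pre ++ [1]) ++ List.replicate m' 0 := by
      rw [List.replicate_succ, set_at_length]; simp
    have h2 := ih m' (pre ++ [1]) (by omega)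
    simp only [setOnes, h1]
    rw [show (pre ++ [(1 : Int)]).length = pre.length + 1 by simp] at h2
    rw [h2]
    simp [List.replicate_succ]

theorem rollLoopA_seg : ∀ (seg : List Int), 2 ∉ seg → ∀ (r : List Int) (i : Nat) (out : List Int) (fp : Nat),
    rollLoopA (seg ++ r) i out fp
      = rollLoopA r (i + seg.length) (setOnes out fp (seg.count 1)) (fp + seg.count 1) := by
  intro seg
  induction seg with
  | nil => intro _ r i out fp; simp [setOnes]
  | cons x t ih =>
    intro h2 r i out fp
    have hx2 : x ≠ 2 := fun h => h2 (by simp [h])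
    have ht2 : 2 ∉ t := fun h => h2 (List.mem_cons_of_mem _ h)
    by_cases hx1 : x = 1
    · subst hx1
      have hcnt : (1 :: t).count 1 = t.count 1 + 1 := by simp
      simp only [List.cons_append, rollLoopA, reduceIte]
      rw [ih ht2, hcnt]
      rw [show i + 1 + t.length = i + (1 :: t).length from by simp; omega,
          show fp + 1 + t.count 1 = fp + (t.count 1 + 1) from by omega]
      simp [setOnes]
    · have hcnt : (x :: t).count 1 = t.count 1 := by
        simp [hx1]
      simp only [List.cons_append, rollLoopA, if_neg hx1, if_neg hx2]
      rw [ih ht2, hcnt]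
      rw [show i + 1 + t.length = i + (x :: t).length from by simp; omega]

theorem rollSplit_no2 (l : List Int) (h : 2 ∉ l) : rollSplit l = [l] := by
  induction l with
  | nil => rfl
  | cons x t ih =>
    have hx : x ≠ 2 := fun hx => h (by simp [hx])
    have ht : 2 ∉ t := fun hm => h (List.mem_cons_of_mem _ hm)
    simp only [rollSplit, if_neg hx, ih ht]

theorem rollSplit_append (seg rest : List Int) (h : 2 ∉ seg) :
    rollSplit (seg ++ 2 :: rest) = seg :: rollSplit rest := by
  induction seg with
  | nil => simp [rollSplit]
  | cons x t ih =>
    have hx : x ≠ 2 := fun hx => h (by simp [hx])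
    have ht : 2 ∉ t := fun hm => h (List.mem_cons_of_mem _ hm)
    simp only [List.cons_append, rollSplit, if_neg hx, ih ht]

theorem split_first2 : ∀ (row : List Int), 2 ∉ row ∨
    ∃ seg rest, row = seg ++ 2 :: rest ∧ 2 ∉ seg := by
  intro row
  induction row with
  | nil => left; simp
  | cons x t ih =>
    by_cases hx : x = 2
    · right; exact ⟨[], t, by simp [hx], by simp⟩
    · cases ih with
      | inl h =>
        left
        intro hm
        rcases List.mem_cons.mp hm with h1 | h1
        · exact hx h1.symm
        · exact h h1
      | inr h =>
        obtain ⟨seg, rest, rfl, hseg⟩ := h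
        right
        refine ⟨x :: seg, rest, by simp, ?_⟩
        intro hm
        rcases List.mem_cons.mp hm with h1 | h1
        · exact hx h1.symm
        · exact hseg h1

theorem rollLoopA_main : ∀ (N : Nat) (row pre : List Int), row.length ≤ N →
    rollLoopA row pre.length (pre ++ List.replicate row.length 0) pre.length
      = pre ++ rollJoin ((rollSplit row).map rollPack) := by
  intro N
  induction N with
  | zero =>
    intro row pre h
    have : row = [] := List.eq_nil_of_length_eq_zero (by omega)
    subst this
    simp [rollLoopA, rollSplit, rollJoin, rollPack]
  | succ N ih =>
    intro row pre hlen
    rcases split_first2 row with h2 | ⟨seg, rest, rfl, hseg⟩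
    · -- no wall: one segment
      have hc : row.count 1 ≤ row.length := List.count_le_length
      have := rollLoopA_seg row h2 [] pre.length (pre ++ List.replicate row.length 0) pre.length
      simp only [List.append_nil] at this
      rw [this, setOnes_spec _ _ _ hc]
      simp only [rollLoopA]
      simp [rollSplit_no2 row h2, rollJoin, rollPack]
    · -- row = seg ++ 2 :: rest, 2 ∉ seg
      set c := seg.count 1 with hc_def
      have hc : c ≤ seg.length := List.count_le_length
      have hmlen : (seg ++ 2 :: rest).length = seg.length + 1 + rest.length := by simp; omega
      rw [rollLoopA_seg seg hseg]
      rw [hmlen, setOnes_spec _ _ _ (by omega)]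
      have hsplit : seg.length + 1 + rest.length - c = (seg.length - c) + 1 + rest.length := by omega
      rw [hsplit]
      simp only [rollLoopA, reduceIte]
      -- rewrite the array as pre' ++ 0 :: replicate |rest| 0, with the write index = |pre'|
      have hrep : List.replicate ((seg.length - c) + 1 + rest.length) (0 : Int)
          = List.replicate (seg.length - c) 0 ++ 0 :: List.replicate rest.length 0 := by
        rw [show (seg.length - c) + 1 + rest.length = (seg.length - c) + (rest.length + 1) from by omega,
            List.replicate_add, List.replicate_succ]
      have harr : pre ++ List.replicate c 1 ++ List.replicate ((seg.length - c) + 1 + rest.length) (0 : Int)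
          = (pre ++ List.replicate c 1 ++ List.replicate (seg.length - c) 0) ++ 0 :: List.replicate rest.length 0 := by
        rw [hrep]; simp
      have hplen : (pre ++ List.replicate c (1 : Int) ++ List.replicate (seg.length - c) 0).length
          = pre.length + seg.length := by simp; omega
      rw [harr, ← hplen, set_at_length, hplen]
      set pre' := pre ++ List.replicate c (1 : Int) ++ List.replicate (seg.length - c) 0 ++ [2] with hpre'
      have hp2 : pre' ++ List.replicate rest.length (0 : Int)
          = (pre ++ List.replicate c 1 ++ List.replicate (seg.length - c) 0) ++ (2 : Int) :: List.replicate rest.length 0 := by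
        simp [hpre']
      have hlen' : pre'.length = pre.length + seg.length + 1 := by
        simp [hpre']; omega
      have hrec := ih rest pre' (by
        have : (seg ++ 2 :: rest).length = seg.length + 1 + rest.length := hmlen
        omega)
      rw [hlen'] at hrec
      rw [← hp2]
      have hstep : pre.length + seg.length + 1 = pre.length + (seg.length + 1) := by omega
      rw [hstep] at hrec ⊢
      rw [hrec]
      -- now compute roll_left_alt on both sides
      simp only [rollSplit_append seg rest hseg, List.map_cons]
      obtain ⟨q, qs, hq⟩ : ∃ q qs, rollSplit rest = q :: qs := by
        cases h : rollSplit rest with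
        | nil => exact absurd h (rollSplit_ne_nil rest)
        | cons q qs => exact ⟨q, qs, rfl⟩
      rw [hq]
      simp only [List.map_cons, rollJoin]
      simp only [hc_def] at *
      simp [hpre', rollPack]

-- ===== VERDICT (by name: the statement is the Claim_ definition above) =====
theorem roll_left_spec : Claim_equal_roll_left := by
  intro row _
  unfold Spec_roll_left roll_left
  rw [alt_eq]
  have := rollLoopA_main row.length row [] (le_refl _)
  simpa using this
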